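-- pv_equiv track=rewrite | github.com/Guiyom974/Autoresearch-BatchMode | experiments/breakthrough/Computational Number Theory - Digit Distribution Patterns - 20260325_231158/run_005/05_experiment_code.py | to_primorial_base
-- ===== SOURCE A (Python) =====
-- def to_primorial_base(n, base):
--     """Convert n to primorial base representation (list of digits, MSB first)."""
--     if n == 0:
--         return [0]
--     digits = []
--     while n > 0:
--         digits.append(n % base)
--         n //= base
--     return digits[::-1]  # MSB first
-- ===== SOURCE B (Python) =====
-- def to_primorial_base(n, base):
--     """Convert n to base representation (list of digits, MSB first) by first
--     finding the largest power of base <= n, then emitting digits MSB-first by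
--     division by descending powers (no digit reversal)."""
--     if n == 0:
--         return [0]
--     if n < 0:
--         return []
--     if base < 2:
--         raise ValueError("base must be >= 2")
--     p = 1
--     while p * base <= n:
--         p *= base
--     digits = []
--     while p >= 1:
--         digits.append(n // p)
--         n %= p
--         p //= base
--     return digits
-- ===== Notes on version B (the rewrite author's own statement) =====
-- stated objective: alternative
-- what changed: B first finds the largest power of base <= n and then emits digits MSB-first by dividing by descending powers, instead of A's LSB digit collection followed by a final reversal; Pre_ restricts to base >= 2 when n > 0 (the task's natural domain): base 0 raises, base 1 hangs, and for base <= -1 A's one-iteration digit list is an artifact of the loop, where B raises ValueError.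
-- outside the precondition, e.g. on to_primorial_base(5, -2): A returns [-1], B raises ValueError
import Mathlib
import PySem

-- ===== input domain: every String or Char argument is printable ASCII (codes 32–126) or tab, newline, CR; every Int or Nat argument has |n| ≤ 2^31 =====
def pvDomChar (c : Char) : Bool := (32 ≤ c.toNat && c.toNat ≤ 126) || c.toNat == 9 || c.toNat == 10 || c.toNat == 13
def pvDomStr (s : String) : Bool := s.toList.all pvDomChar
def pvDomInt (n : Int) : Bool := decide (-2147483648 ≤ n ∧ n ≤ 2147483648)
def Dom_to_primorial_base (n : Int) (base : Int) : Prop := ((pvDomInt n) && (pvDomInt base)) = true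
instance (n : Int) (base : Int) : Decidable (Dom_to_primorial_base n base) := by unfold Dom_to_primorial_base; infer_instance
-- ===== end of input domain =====

-- B finds the largest power of base ≤ n first and then emits digits MSB-first by division
-- by descending powers, instead of A's LSB digit collection followed by a final reversal.

-- ===== PORT A =====
-- A's while loop; fuel n.toNat+1 is enough: with base ≥ 2, n strictly decreases each
-- iteration (outside Pre_ the Python raises or diverges, so the fuel-exhaustion value
-- is not claimed).
def pvALoop : Nat → Int → Int → List Int → List Int
  | 0, _, _, digits => digits
  | fuel + 1, n, base, digits =>
      if n > 0 then
        pvALoop fuel (PySem.Int.floordiv n base) base (digits ++ [PySem.Int.mod n base])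
      else digits

def to_primorial_base (n : Int) (base : Int) : List Int :=
  if n = 0 then [0]
  else (pvALoop (n.toNat + 1) n base []).reverse  -- digits[::-1] = List.reverse (exact)

-- ===== PORT B =====
-- Source B's first loop: while p * base <= n: p *= base  (fuel n.toNat+1 is enough: p at
-- least doubles each iteration inside Pre_).
def pvPowLoop (base n : Int) : Nat → Int → Int
  | 0, p => p
  | fuel + 1, p => if p * base ≤ n then pvPowLoop base n fuel (p * base) else p

-- Source B's second loop: while p >= 1: digits.append(n // p); n %= p; p //= base
def pvDownLoop (base : Int) : Nat → Int → Int → List Int → List Int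
  | 0, _, _, digits => digits
  | fuel + 1, n, p, digits =>
      if p ≥ 1 then
        pvDownLoop base fuel (PySem.Int.mod n p) (PySem.Int.floordiv p base)
          (digits ++ [PySem.Int.floordiv n p])
      else digits

def to_primorial_base_alt (n : Int) (base : Int) : List Int :=
  if n = 0 then [0]
  else if n < 0 then []
  else if base < 2 then []  -- Source B raises ValueError here (outside Pre_); value unclaimed
  else pvDownLoop base (n.toNat + 1) n (pvPowLoop base n (n.toNat + 1) 1) []

-- ===== PRECONDITION & SPEC =====
-- Pre_ restricts positive n to base ≥ 2, the task's natural domain: for n > 0 A raises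
-- ZeroDivisionError on base = 0, never terminates on base = 1, and for base ≤ -1 its
-- one-iteration digit list (e.g. A(5, -2) = [-1]) is an artifact of the loop on a base
-- outside the task's natural domain, where B raises ValueError.
def Pre_to_primorial_base (n : Int) (base : Int) : Prop :=
  0 < n → 2 ≤ base
instance (n : Int) (base : Int) : Decidable (Pre_to_primorial_base n base) := by
  unfold Pre_to_primorial_base; infer_instance

def pvWitness_to_primorial_base : Int × Int := (100, 3)

def Spec_to_primorial_base (n : Int) (base : Int) (out : List Int) : Prop := out = to_primorial_base_alt n base
instance (n : Int) (base : Int) (out : List Int) : Decidable (Spec_to_primorial_base n base out) := by unfold Spec_to_primorial_base; infer_instance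

-- ===== CLAIM (what is proved, stated in full; the proofs are below) =====
def Claim_equal_to_primorial_base : Prop := ∀ (n : Int) (base : Int), Dom_to_primorial_base n base → Pre_to_primorial_base n base → Spec_to_primorial_base n base (to_primorial_base n base)

-- ===== LEMMAS AND PROOFS =====

-- Proof-side helpers: the MSB-first digit recursion (specification of A's loop) and the
-- (k+1)-digit representation by descending powers (specification of B's second loop).
def pvMsb (base : Int) : Nat → Int → List Int
  | 0, _ => []
  | fuel + 1, n =>
      if n ≤ 0 then []
      else pvMsb base fuel (PySem.Int.floordiv n base) ++ [PySem.Int.mod n base]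

def pvPad (base : Int) : Nat → Int → List Int
  | 0, m => [m]
  | k + 1, m => PySem.Int.floordiv m (base ^ (k + 1)) :: pvPad base k (PySem.Int.mod m (base ^ (k + 1)))

-- Uniqueness of floor division with positive divisor.
theorem pv_uniq (b x q r : Int) (hb : 0 < b) (hr0 : 0 ≤ r) (hrb : r < b)
    (hx : x = q * b + r) : PySem.Int.floordiv x b = q ∧ PySem.Int.mod x b = r := by
  have hq : PySem.Int.floordiv x b = q := by
    rw [PySem.Int.floordiv_eq_iff_of_pos hb]
    constructor
    · nlinarith
    · nlinarith
  refine ⟨hq, ?_⟩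
  have h := PySem.Int.floordiv_mul_add_mod x b
  rw [hq] at h
  linarith

theorem pvALoop_eq_msb (fuel : Nat) (n base : Int) (digits : List Int) :
    pvALoop fuel n base digits = digits ++ (pvMsb base fuel n).reverse := by
  induction fuel generalizing n digits with
  | zero => simp [pvALoop, pvMsb]
  | succ k ih =>
      simp only [pvALoop, pvMsb]
      by_cases h : n > 0
      · have h' : ¬ n ≤ 0 := by omega
        simp [h, h', ih]
      · have h' : n ≤ 0 := by omega
        simp [h, h']

theorem pvMsb_zero (base : Int) (fuel : Nat) : pvMsb base fuel 0 = [] := by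
  cases fuel <;> simp [pvMsb]

theorem pvDownLoop_zero (base : Int) (fuel : Nat) (n : Int) (acc : List Int) :
    pvDownLoop base fuel n 0 acc = acc := by
  cases fuel <;> simp [pvDownLoop]

-- LSB-peeling rule for the padded representation.
theorem pvPad_rec (base : Int) (hb : 2 ≤ base) :
    ∀ (k : Nat) (m : Int), 0 ≤ m →
      pvPad base (k + 1) m = pvPad base k (PySem.Int.floordiv m base) ++ [PySem.Int.mod m base] := by
  intro k
  induction k with
  | zero =>
      intro m _
      simp [pvPad, pow_one]
  | succ k ih =>
      intro m hm
      have hbpos : (0:Int) < base := by omega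
      have hP : (0:Int) < base ^ (k + 1) := pow_pos hbpos _
      have hQ : (0:Int) < base ^ (k + 2) := pow_pos hbpos _
      -- decompose m by Q = base^(k+2), then its remainder by base
      set q2 := PySem.Int.floordiv m (base ^ (k + 2)) with hq2
      set r2 := PySem.Int.mod m (base ^ (k + 2)) with hr2
      have hr2n : 0 ≤ r2 := PySem.Int.mod_nonneg m hQ
      have hr2l : r2 < base ^ (k + 2) := PySem.Int.mod_lt m hQ
      have hm_eq : q2 * base ^ (k + 2) + r2 = m := PySem.Int.floordiv_mul_add_mod m _
      set a := PySem.Int.floordiv r2 base with ha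
      set c := PySem.Int.mod r2 base with hc
      have hcn : 0 ≤ c := PySem.Int.mod_nonneg r2 hbpos
      have hcl : c < base := PySem.Int.mod_lt r2 hbpos
      have hr2_eq : a * base + c = r2 := PySem.Int.floordiv_mul_add_mod r2 _
      have hal : a < base ^ (k + 1) := by
        rw [ha, PySem.Int.floordiv_lt_iff_lt_mul hbpos]
        calc r2 < base ^ (k + 2) := hr2l
        _ = base ^ (k + 1) * base := by ring
      have han : 0 ≤ a := by nlinarith
      -- floordiv/mod of m by base
      have hdm : PySem.Int.floordiv m base = q2 * base ^ (k + 1) + a ∧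
          PySem.Int.mod m base = c := by
        apply pv_uniq base m (q2 * base ^ (k + 1) + a) c hbpos hcn hcl
        rw [← hm_eq, ← hr2_eq]; ring
      -- floordiv/mod of (m // base) by base^(k+1)
      have hdm2 : PySem.Int.floordiv (PySem.Int.floordiv m base) (base ^ (k + 1)) = q2 ∧
          PySem.Int.mod (PySem.Int.floordiv m base) (base ^ (k + 1)) = a := by
        rw [hdm.1]
        exact pv_uniq _ _ _ _ hP han hal (by ring)
      show PySem.Int.floordiv m (base ^ (k + 2)) ::
          pvPad base (k + 1) (PySem.Int.mod m (base ^ (k + 2)))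
        = pvPad base (k + 1) (PySem.Int.floordiv m base) ++ [PySem.Int.mod m base]
      rw [ih r2 hr2n]
      show q2 :: (pvPad base k a ++ [c]) = _
      rw [hdm.2]
      have : pvPad base (k + 1) (PySem.Int.floordiv m base)
          = q2 :: pvPad base k a := by
        show PySem.Int.floordiv (PySem.Int.floordiv m base) (base ^ (k + 1)) ::
            pvPad base k (PySem.Int.mod (PySem.Int.floordiv m base) (base ^ (k + 1)))
          = q2 :: pvPad base k a
        rw [hdm2.1, hdm2.2]
      rw [this]
      simp

-- A's loop computes the padded representation whose width matches n.
theorem pvMsb_eq_pad (base : Int) (hb : 2 ≤ base) :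
    ∀ (k fuel : Nat) (n : Int), base ^ k ≤ n → n < base ^ (k + 1) → k < fuel →
      pvMsb base fuel n = pvPad base k n := by
  intro k
  induction k with
  | zero =>
      intro fuel n h1 h2 hf
      obtain ⟨f, rfl⟩ : ∃ f, fuel = f + 1 := ⟨fuel - 1, by omega⟩
      have hn1 : (1:Int) ≤ n := by simpa using h1
      have hnb : n < base := by simpa using h2
      have hng : ¬ n ≤ 0 := by omega
      have hd : PySem.Int.floordiv n base = 0 ∧ PySem.Int.mod n base = n :=
        pv_uniq base n 0 n (by omega) (by omega) hnb (by ring)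
      simp [pvMsb, hng, hd.1, hd.2, pvMsb_zero, pvPad]
  | succ k ih =>
      intro fuel n h1 h2 hf
      obtain ⟨f, rfl⟩ : ∃ f, fuel = f + 1 := ⟨fuel - 1, by omega⟩
      have hbpos : (0:Int) < base := by omega
      have hP : (0:Int) < base ^ (k + 1) := pow_pos hbpos _
      have hn0 : (0:Int) < n := lt_of_lt_of_le hP h1
      have hng : ¬ n ≤ 0 := by omega
      have hlow : base ^ k ≤ PySem.Int.floordiv n base := by
        rw [PySem.Int.le_floordiv_iff_mul_le hbpos]
        calc base ^ k * base = base ^ (k + 1) := by ring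
        _ ≤ n := h1
      have hhigh : PySem.Int.floordiv n base < base ^ (k + 1) := by
        rw [PySem.Int.floordiv_lt_iff_lt_mul hbpos]
        calc n < base ^ (k + 2) := h2
        _ = base ^ (k + 1) * base := by ring
      have := ih f (PySem.Int.floordiv n base) hlow hhigh (by omega)
      simp only [pvMsb, if_neg hng, this]
      rw [← pvPad_rec base hb k n (le_of_lt hn0)]

-- B's second loop computes the padded representation of width k+1 from p = base^k.
theorem pvDownLoop_eq_pad (base : Int) (hb : 2 ≤ base) :
    ∀ (k fuel : Nat) (n : Int) (acc : List Int), 0 ≤ n → k < fuel →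
      pvDownLoop base fuel n (base ^ k) acc = acc ++ pvPad base k n := by
  intro k
  induction k with
  | zero =>
      intro fuel n acc hn hf
      obtain ⟨f, rfl⟩ : ∃ f, fuel = f + 1 := ⟨fuel - 1, by omega⟩
      have h1 : PySem.Int.floordiv 1 base = 0 ∧ PySem.Int.mod 1 base = 1 :=
        pv_uniq base 1 0 1 (by omega) (by omega) (by omega) (by ring)
      simp [pvDownLoop, h1.1, pvDownLoop_zero, pvPad]
  | succ k ih =>
      intro fuel n acc hn hf
      obtain ⟨f, rfl⟩ : ∃ f, fuel = f + 1 := ⟨fuel - 1, by omega⟩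
      have hbpos : (0:Int) < base := by omega
      have hP : (0:Int) < base ^ (k + 1) := pow_pos hbpos _
      have hPb : PySem.Int.floordiv (base ^ (k + 1)) base = base ^ k ∧
          PySem.Int.mod (base ^ (k + 1)) base = 0 :=
        pv_uniq base (base ^ (k + 1)) (base ^ k) 0 hbpos (by omega) hbpos (by ring)
      have hrecn : 0 ≤ PySem.Int.mod n (base ^ (k + 1)) := PySem.Int.mod_nonneg n hP
      have hguard : base ^ (k + 1) ≥ 1 := hP
      simp only [pvDownLoop, if_pos hguard, hPb.1]
      rw [ih f _ _ hrecn (by omega)]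
      show (acc ++ [PySem.Int.floordiv n (base ^ (k + 1))]) ++
          pvPad base k (PySem.Int.mod n (base ^ (k + 1))) = acc ++ pvPad base (k + 1) n
      simp [pvPad]

-- B's first loop finds the largest power of base not exceeding n.
theorem pvPowLoop_spec (base n : Int) (_hb : 2 ≤ base) :
    ∀ (fuel j : Nat), base ^ j ≤ n → n < base ^ (j + fuel) →
      ∃ k, pvPowLoop base n fuel (base ^ j) = base ^ k ∧ base ^ k ≤ n ∧ n < base ^ (k + 1) := by
  intro fuel
  induction fuel with
  | zero =>
      intro j h1 h2
      simp only [Nat.add_zero] at h2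
      omega
  | succ f ih =>
      intro j h1 h2
      simp only [pvPowLoop]
      by_cases h : base ^ j * base ≤ n
      · have h1' : base ^ (j + 1) ≤ n := by
          calc base ^ (j + 1) = base ^ j * base := by ring
          _ ≤ n := h
        have h2' : n < base ^ ((j + 1) + f) := by
          have : (j + 1) + f = j + (f + 1) := by omega
          rw [this]; exact h2
        obtain ⟨k, hk⟩ := ih (j + 1) h1' h2'
        refine ⟨k, ?_, hk.2⟩
        rw [if_pos h, ← hk.1]
        congr 1
        ring
      · refine ⟨j, ?_, h1, ?_⟩
        · rw [if_neg h]
        · calc n < base ^ j * base := by omega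
          _ = base ^ (j + 1) := by ring

-- 2^k grows past any integer (used for fuel adequacy).
theorem pv_lt_pow (base : Int) (hb : 2 ≤ base) (m : Nat) : (m : Int) < base ^ m := by
  have h2 : (m : Int) < 2 ^ m := by exact_mod_cast Nat.lt_two_pow_self
  have : (2:Int) ^ m ≤ base ^ m := pow_le_pow_left₀ (by omega) hb m
  omega

-- ===== VERDICT (by name: the statement is the Claim_ definition above) =====
theorem to_primorial_base_spec : Claim_equal_to_primorial_base := by
  intro n base _ hpre
  unfold Spec_to_primorial_base to_primorial_base to_primorial_base_alt
  by_cases h0 : n = 0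
  · simp [h0]
  · by_cases hneg : n < 0
    · have : ¬ n > 0 := by omega
      simp [h0, hneg, pvALoop, this]
    · have hn : 0 < n := by omega
      have hb : 2 ≤ base := hpre hn
      have hbneg : ¬ base < 2 := by omega
      have hnn : (n.toNat : Int) = n := Int.toNat_of_nonneg (by omega)
      -- fuel adequacy for the power search
      have hfuel : n < base ^ (0 + (n.toNat + 1)) := by
        have := pv_lt_pow base hb (n.toNat + 1)
        simp only [Nat.zero_add]
        omega
      obtain ⟨k, hkp, hk1, hk2⟩ :=
        pvPowLoop_spec base n hb (n.toNat + 1) 0 (by simpa using hn) hfuel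
      -- k fits in the fuel of both loops
      have hklt : k < n.toNat + 1 := by
        have h2k : (k : Int) < base ^ k := pv_lt_pow base hb k
        have : (k : Int) < n := lt_of_lt_of_le h2k hk1
        omega
      rw [pvALoop_eq_msb, List.nil_append, List.reverse_reverse,
        pvMsb_eq_pad base hb k (n.toNat + 1) n hk1 hk2 hklt]
      simp only [pow_zero] at hkp
      simp only [if_neg h0, if_neg hneg, if_neg hbneg, hkp]
      rw [pvDownLoop_eq_pad base hb k (n.toNat + 1) n [] (by omega) hklt]
      simp
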